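-- pv_equiv track=rewrite | github.com/IanSkapin/Python | zero_length_compression.py | fix_compressed
-- ===== SOURCE A (Python) =====
-- def fix_compressed(comp, remove, K):
--     updated = []
--     for idx, (cnt, e) in enumerate(comp):
--         if idx == remove:
--             K -= cnt
--             if K > 0:
--                 remove += 1
--             elif K < 0:
--                 if updated and updated[-1][1] == e:
--                     updated[-1][0] += -K
--                 else:
--                     updated.append([-K, e])
--             continue
--         if updated and updated[-1][1] == e:
--             updated[-1][0] += cnt
--         else:
--             updated.append([cnt, e])
--     return updated
-- ===== SOURCE B (Python) =====
-- def fix_compressed(comp, remove, K):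
--     # Phase 1: build the trimmed run sequence without any merging.
--     trimmed = [(c, e) for c, e in comp]
--     if 0 <= remove < len(comp):
--         i = remove
--         k = K
--         e_last = None
--         while i < len(comp):
--             c, e = comp[i]
--             k -= c
--             e_last = e
--             i += 1
--             if k <= 0:
--                 break
--         mid = [(-k, e_last)] if k < 0 else []
--         trimmed = trimmed[:remove] + mid + trimmed[i:]
--     # Phase 2: coalesce adjacent runs with equal elements.
--     out = []
--     for c, e in trimmed:
--         if out and out[-1][1] == e:
--             out[-1][0] += c
--         else:
--             out.append([c, e])
--     return out
-- ===== Notes on version B (the rewrite author's own statement) =====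
-- stated objective: alternative
-- what changed: B splits A's single fused loop into two separate passes: a trim phase that slices off the removal span (an explicit while consuming runs while the running K stays positive, emitting at most one remainder run) and an independent coalescing pass merging adjacent equal elements.
import Mathlib
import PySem

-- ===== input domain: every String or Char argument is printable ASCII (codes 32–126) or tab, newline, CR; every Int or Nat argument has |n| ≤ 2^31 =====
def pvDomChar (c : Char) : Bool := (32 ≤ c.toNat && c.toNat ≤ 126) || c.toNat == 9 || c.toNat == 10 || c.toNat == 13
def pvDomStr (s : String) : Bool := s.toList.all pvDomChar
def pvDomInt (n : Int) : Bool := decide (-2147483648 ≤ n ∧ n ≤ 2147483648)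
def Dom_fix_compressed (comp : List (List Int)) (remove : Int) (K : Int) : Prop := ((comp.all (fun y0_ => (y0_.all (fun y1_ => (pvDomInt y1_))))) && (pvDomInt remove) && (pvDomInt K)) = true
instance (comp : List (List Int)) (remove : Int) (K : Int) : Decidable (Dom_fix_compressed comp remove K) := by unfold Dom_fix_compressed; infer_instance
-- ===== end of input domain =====

-- B re-decomposes A's fused loop into a slice-based trim phase plus a separate coalescing
-- pass over the trimmed run list; same asymptotic cost, proved to return the same value.

-- ===== PORT A =====
-- append-or-merge step of A's `updated` accumulator (`updated[-1][0] += cnt` / append)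
def pushA (updated : List (List Int)) (cnt e : Int) : List (List Int) :=
  match updated.getLast? with
  | some l => if (l.drop 1).headD 0 = e then updated.dropLast ++ [[l.headD 0 + cnt, e]]
              else updated ++ [[cnt, e]]
  | none => [[cnt, e]]

-- A's for-loop over enumerate(comp), with idx carried explicitly
def pvLoopA (updated : List (List Int)) (idx : Nat) (rem k : Int) : List (List Int) → List (List Int)
  | [] => updated
  | r :: rest =>
      let cnt := r.headD 0
      let e := (r.drop 1).headD 0
      if (idx : Int) = rem then
        let k' := k - cnt
        if k' > 0 then pvLoopA updated (idx + 1) (rem + 1) k' rest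
        else if k' < 0 then pvLoopA (pushA updated (-k') e) (idx + 1) rem k' rest
        else pvLoopA updated (idx + 1) rem k' rest
      else pvLoopA (pushA updated cnt e) (idx + 1) rem k rest

def fix_compressed (comp : List (List Int)) (remove : Int) (K : Int) : List (List Int) :=
  pvLoopA [] 0 remove K comp

-- ===== PORT B =====
-- Source B's while loop over the removal span: returns (#runs consumed, final k, last element seen)
def pvConsume : List (List Int) → Int → Nat × Int × Int
  | [], k => (0, k, 0)
  | r :: rest, k =>
      let c := r.headD 0
      let e := (r.drop 1).headD 0
      let k' := k - c
      if k' ≤ 0 then (1, k', e)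
      else
        let p := pvConsume rest k'
        (p.1 + 1, p.2.1, p.2.2)

-- Source B's phase-2 append-or-merge step (`out[-1][0] += c` / append)
def pushB (out : List (List Int)) (c e : Int) : List (List Int) :=
  match out.getLast? with
  | some l => if (l.drop 1).headD 0 = e then out.dropLast ++ [[l.headD 0 + c, e]]
              else out ++ [[c, e]]
  | none => [[c, e]]

-- Source B's phase-2 loop: coalesce adjacent runs with equal elements
def pvCoalesce (out : List (List Int)) : List (Int × Int) → List (List Int)
  | [] => out
  | (c, e) :: rest => pvCoalesce (pushB out c e) rest

def fix_compressed_alt (comp : List (List Int)) (remove : Int) (K : Int) : List (List Int) :=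
  let trimmed := comp.map (fun r => (r.headD 0, (r.drop 1).headD 0))
  let trimmed2 :=
    if 0 ≤ remove ∧ remove < (comp.length : Int) then
      let rn := remove.toNat
      let p := pvConsume (comp.drop rn) K
      let mid := if p.2.1 < 0 then [(-p.2.1, p.2.2)] else []
      trimmed.take rn ++ mid ++ trimmed.drop (rn + p.1)
    else trimmed
  pvCoalesce [] trimmed2

-- ===== PRECONDITION & SPEC =====
-- Pre_ excludes rows that are not two-element lists: on those Python's tuple unpacking raises ValueError in both A and B.
def Pre_fix_compressed (comp : List (List Int)) (remove : Int) (K : Int) : Prop :=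
  ∀ r ∈ comp, r.length = 2
instance (comp : List (List Int)) (remove : Int) (K : Int) : Decidable (Pre_fix_compressed comp remove K) := by unfold Pre_fix_compressed; infer_instance

def pvWitness_fix_compressed : List (List Int) × Int × Int := ([[3, 1], [2, 2], [4, 1]], 1, 1)

def Spec_fix_compressed (comp : List (List Int)) (remove : Int) (K : Int) (out : List (List Int)) : Prop := out = fix_compressed_alt comp remove K
instance (comp : List (List Int)) (remove : Int) (K : Int) (out : List (List Int)) : Decidable (Spec_fix_compressed comp remove K out) := by unfold Spec_fix_compressed; infer_instance

-- ===== CLAIM (what is proved, stated in full; the proofs are below) =====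
def Claim_equal_fix_compressed : Prop := ∀ (comp : List (List Int)) (remove : Int) (K : Int), Dom_fix_compressed comp remove K → Pre_fix_compressed comp remove K → Spec_fix_compressed comp remove K (fix_compressed comp remove K)

-- ===== LEMMAS AND PROOFS =====

def pvPair (r : List Int) : Int × Int := (r.headD 0, (r.drop 1).headD 0)

-- the sequence of runs A emits (into pushA), as a pure list
def trimSeq : List (List Int) → Nat → Int → Int → List (Int × Int)
  | [], _, _, _ => []
  | r :: rest, i0, rem, k =>
      let c := r.headD 0
      let e := (r.drop 1).headD 0
      if (i0 : Int) = rem then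
        let k' := k - c
        if k' > 0 then trimSeq rest (i0 + 1) (rem + 1) k'
        else if k' < 0 then (-k', e) :: trimSeq rest (i0 + 1) rem k'
        else trimSeq rest (i0 + 1) rem k'
      else (c, e) :: trimSeq rest (i0 + 1) rem k

def foldPush (u : List (List Int)) (xs : List (Int × Int)) : List (List Int) :=
  xs.foldl (fun u p => pushA u p.1 p.2) u

theorem pvLoopA_eq_foldPush (comp : List (List Int)) :
    ∀ (updated : List (List Int)) (i0 : Nat) (rem k : Int),
      pvLoopA updated i0 rem k comp = foldPush updated (trimSeq comp i0 rem k) := by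
  induction comp with
  | nil => intro updated i0 rem k; simp [pvLoopA, trimSeq, foldPush]
  | cons r rest ih =>
      intro updated i0 rem k
      simp only [pvLoopA, trimSeq]
      split_ifs <;> simp [foldPush, ih]

theorem pushB_eq_pushA : ∀ (u : List (List Int)) (c e : Int), pushB u c e = pushA u c e := by
  intro u c e; rfl

theorem pvCoalesce_eq_foldPush (xs : List (Int × Int)) :
    ∀ (out : List (List Int)), pvCoalesce out xs = foldPush out xs := by
  induction xs with
  | nil => intro out; simp [pvCoalesce, foldPush]
  | cons p rest ih =>
      intro out
      obtain ⟨c, e⟩ := p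
      simp only [pvCoalesce, foldPush, List.foldl_cons, pushB_eq_pushA]
      exact ih _

-- when no index of the traversal can match rem, A just copies runs
theorem trimSeq_out (comp : List (List Int)) :
    ∀ (i0 : Nat) (rem k : Int), (rem < (i0 : Int) ∨ (i0 : Int) + comp.length ≤ rem) →
      trimSeq comp i0 rem k = comp.map pvPair := by
  induction comp with
  | nil => intro i0 rem k _; simp [trimSeq]
  | cons r rest ih =>
      intro i0 rem k h
      have hne : ¬ ((i0 : Int) = rem) := by
        simp only [List.length_cons] at h; push_cast at h; omega
      simp only [trimSeq, if_neg hne]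
      rw [ih (i0 + 1) rem k (by simp only [List.length_cons] at h; push_cast at h ⊢; omega)]
      simp [pvPair]

-- skip the prefix before the removal index
theorem trimSeq_split (d : Nat) :
    ∀ (comp : List (List Int)) (i0 : Nat) (k rem : Int), rem = (i0 : Int) + d →
      trimSeq comp i0 rem k =
        (comp.take d).map pvPair ++ trimSeq (comp.drop d) (i0 + d) rem k := by
  induction d with
  | zero => intro comp i0 k rem _; simp
  | succ d ih =>
      intro comp i0 k rem hrem
      cases comp with
      | nil => simp [trimSeq]
      | cons r rest =>
          have hne : ¬ ((i0 : Int) = rem) := by push_cast at hrem ⊢; omega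
          simp only [trimSeq, if_neg hne, List.take_succ_cons, List.drop_succ_cons,
            List.map_cons, List.cons_append]
          rw [ih rest (i0 + 1) k rem (by push_cast at hrem ⊢; omega),
            show i0 + 1 + d = i0 + (d + 1) by omega]
          simp [pvPair]

-- the removal span itself: trimSeq from the matching index equals mid ++ untouched tail
theorem trimSeq_consume (comp : List (List Int)) (hne : comp ≠ []) :
    ∀ (i0 : Nat) (k rem : Int), rem = (i0 : Int) →
      trimSeq comp i0 rem k =
        (if (pvConsume comp k).2.1 < 0 then [(-(pvConsume comp k).2.1, (pvConsume comp k).2.2)] else [])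
          ++ (comp.drop (pvConsume comp k).1).map pvPair := by
  induction comp with
  | nil => exact absurd rfl hne
  | cons r rest ih =>
      intro i0 k rem hrem
      subst hrem
      simp only [trimSeq, pvConsume]
      by_cases hk : k - r.headD 0 ≤ 0
      · have h1 : ¬ (k - r.headD 0 > 0) := by omega
        simp only [if_pos hk, h1, if_false]
        by_cases hk2 : k - r.headD 0 < 0
        · simp only [if_pos hk2]
          rw [trimSeq_out rest (i0 + 1) (i0 : Int) (k - r.headD 0) (by push_cast; omega)]
          simp
        · simp only [if_neg hk2]
          rw [trimSeq_out rest (i0 + 1) (i0 : Int) (k - r.headD 0) (by push_cast; omega)]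
          simp
      · have h1 : k - r.headD 0 > 0 := by omega
        simp only [if_neg hk, if_pos h1]
        cases rest with
        | nil =>
            simp only [trimSeq, pvConsume]
            simp only [List.headD_eq_head?_getD] at h1
            simp [show ¬ (k - r.head?.getD 0 < 0) by omega]
        | cons r2 rest2 =>
            rw [ih (List.cons_ne_nil r2 rest2) (i0 + 1) (k - r.headD 0) ((i0 : Int) + 1)
              (by push_cast; ring)]
            simp

theorem map_pvPair (comp : List (List Int)) :
    comp.map (fun r => (r.headD 0, (r.drop 1).headD 0)) = comp.map pvPair := rfl

theorem fix_compressed_eq (comp : List (List Int)) (remove K : Int) :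
    fix_compressed comp remove K = fix_compressed_alt comp remove K := by
  unfold fix_compressed fix_compressed_alt
  rw [pvLoopA_eq_foldPush]
  simp only [pvCoalesce_eq_foldPush, map_pvPair]
  congr 1
  by_cases h : 0 ≤ remove ∧ remove < (comp.length : Int)
  · rw [if_pos h]
    obtain ⟨h0, hlen⟩ := h
    set rn := remove.toNat with hrn
    have hdne : comp.drop rn ≠ [] := by
      have : rn < comp.length := by omega
      simp [List.drop_eq_nil_iff]; omega
    rw [trimSeq_split rn comp 0 K remove (by push_cast; omega),
      trimSeq_consume (comp.drop rn) hdne (0 + rn) K remove (by push_cast; omega)]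
    simp only [List.map_take, List.map_drop, List.drop_drop, List.append_assoc]
  · rw [if_neg h]
    exact trimSeq_out comp 0 remove K (by push_cast; omega)

-- ===== VERDICT (by name: the statement is the Claim_ definition above) =====
theorem fix_compressed_spec : Claim_equal_fix_compressed := by
  intro comp remove K _ _
  unfold Spec_fix_compressed
  exact fix_compressed_eq comp remove K
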